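-- pv_equiv track=rewrite | github.com/heyoeyo/adventofcode-2023 | day_07/solution.py | get_tiebreaker_scores
-- ===== SOURCE A (Python) =====
-- def get_tiebreaker_scores(cards_list, base15_lut):
--
--     ''' Function which interprets each card as a base15 number, which can then be used as a tiebreaker score '''
--
--     # Helper function to convert characters (e.g. "A", "7", "J") into integers, according to lut
--     char_to_int = lambda char: int(char) if char.isdigit() else base15_lut[char]
--
--     # Convert each character into a base15 number using the given lut
--     # Example: '32T3K' -> b15 digits: [3, 2, 10, 3, 13] -> place values: [3*15^4, 2*15^3, 10*15^2, 3*15^1, 13*15^0]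
--     scores_list = []
--     for each_card_seq in cards_list:
--         b15_digits = [char_to_int(each_char) for each_char in each_card_seq]
--         place_values = [digit * (15**place_idx) for place_idx, digit in enumerate(reversed(b15_digits))]
--         scores_list.append(sum(place_values))
--
--     return scores_list
-- ===== SOURCE B (Python) =====
-- def get_tiebreaker_scores(cards_list, base15_lut):
--     ''' Horner's method: one running accumulator per card, no intermediate lists '''
--     char_to_int = lambda char: int(char) if char.isdigit() else base15_lut[char]
--     scores_list = []
--     for each_card_seq in cards_list:
--         score = 0
--         for each_char in each_card_seq:
--             score = score * 15 + char_to_int(each_char)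
--         scores_list.append(score)
--     return scores_list
-- ===== Notes on version B (the rewrite author's own statement) =====
-- stated objective: simpler
-- what changed: Replaces the per-card pipeline of digit list + reversed/enumerate power list + sum with a single left-to-right Horner accumulator (score = score*15 + digit), eliminating both intermediate lists and the 15**i computations.
import Mathlib
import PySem

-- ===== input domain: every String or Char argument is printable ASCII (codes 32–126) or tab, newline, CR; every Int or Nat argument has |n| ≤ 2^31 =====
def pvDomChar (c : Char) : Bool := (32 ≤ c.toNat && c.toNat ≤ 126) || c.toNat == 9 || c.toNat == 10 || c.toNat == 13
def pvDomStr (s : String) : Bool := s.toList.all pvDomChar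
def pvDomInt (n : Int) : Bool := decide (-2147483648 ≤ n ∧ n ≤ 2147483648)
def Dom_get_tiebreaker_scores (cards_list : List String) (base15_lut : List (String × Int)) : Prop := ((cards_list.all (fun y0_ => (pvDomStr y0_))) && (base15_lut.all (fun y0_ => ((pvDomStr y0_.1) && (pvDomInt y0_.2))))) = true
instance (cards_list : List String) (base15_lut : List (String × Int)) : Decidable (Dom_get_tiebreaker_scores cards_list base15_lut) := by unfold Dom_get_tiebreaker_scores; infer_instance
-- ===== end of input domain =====

-- B replaces the digit-list / reversed-enumerate power-list / sum pipeline by a single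
-- left-to-right Horner accumulator per card (score = score*15 + digit): simpler, no temporaries.

-- ===== PORT A =====
-- dict lookup base15_lut[key]: first match; the default 0 is never reached under Pre_ (a
-- missing key is a KeyError in Python and is excluded by Pre_get_tiebreaker_scores)
def pvLut (base15_lut : List (String × Int)) (k : String) : Int :=
  ((base15_lut.find? (fun p => p.1 == k)).map Prod.snd).getD 0

-- char_to_int = lambda char: int(char) if char.isdigit() else base15_lut[char]
-- (shared helper of both Pythons, kept byte-for-byte identical there)
def pvCharToInt (base15_lut : List (String × Int)) (c : Char) : Int :=
  if PySem.Chars.isdigit c then (PySem.Int.ofChars? [c]).getD 0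
  else pvLut base15_lut (String.mk [c])

def get_tiebreaker_scores (cards_list : List String) (base15_lut : List (String × Int)) : List Int :=
  cards_list.foldl
    (fun scores_list each_card_seq =>
      let b15_digits := each_card_seq.toList.map (pvCharToInt base15_lut)
      let place_values :=
        (PySem.List.enumerate b15_digits.reverse 0).map (fun p => p.2 * 15 ^ p.1.toNat)
      scores_list ++ [place_values.sum])
    []

-- ===== PORT B =====
def get_tiebreaker_scores_alt (cards_list : List String) (base15_lut : List (String × Int)) : List Int :=
  cards_list.map (fun each_card_seq =>
    each_card_seq.toList.foldl (fun score c => score * 15 + pvCharToInt base15_lut c) 0)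

-- ===== PRECONDITION & SPEC =====
-- Pre_ excludes exactly the inputs where Python A raises KeyError: a non-digit character
-- whose single-character string is not a key of base15_lut.
def Pre_get_tiebreaker_scores (cards_list : List String) (base15_lut : List (String × Int)) : Prop :=
  (cards_list.all (fun s => s.toList.all (fun c =>
    PySem.Chars.isdigit c || base15_lut.any (fun p => p.1 == String.mk [c])))) = true
instance (cards_list : List String) (base15_lut : List (String × Int)) : Decidable (Pre_get_tiebreaker_scores cards_list base15_lut) := by unfold Pre_get_tiebreaker_scores; infer_instance

def pvWitness_get_tiebreaker_scores : List String × (List (String × Int)) :=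
  (["32T3K", "T55J5"], [("T", 10), ("J", 11), ("Q", 12), ("K", 13), ("A", 14)])

def Spec_get_tiebreaker_scores (cards_list : List String) (base15_lut : List (String × Int)) (out : List Int) : Prop := out = get_tiebreaker_scores_alt cards_list base15_lut
instance (cards_list : List String) (base15_lut : List (String × Int)) (out : List Int) : Decidable (Spec_get_tiebreaker_scores cards_list base15_lut out) := by unfold Spec_get_tiebreaker_scores; infer_instance

-- ===== CLAIM (what is proved, stated in full; the proofs are below) =====
def Claim_equal_get_tiebreaker_scores : Prop := ∀ (cards_list : List String) (base15_lut : List (String × Int)), Dom_get_tiebreaker_scores cards_list base15_lut → Pre_get_tiebreaker_scores cards_list base15_lut → Spec_get_tiebreaker_scores cards_list base15_lut (get_tiebreaker_scores cards_list base15_lut)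

-- ===== LEMMAS AND PROOFS =====

-- shifting the enumerate start multiplies every place value by 15^n
theorem pv_enum_shift (xs : List Int) (n : Nat) :
    ((PySem.List.enumerate xs (n : Int)).map (fun p => p.2 * 15 ^ p.1.toNat)).sum
      = 15 ^ n * ((PySem.List.enumerate xs 0).map (fun p => p.2 * 15 ^ p.1.toNat)).sum := by
  induction xs generalizing n with
  | nil => simp [PySem.List.enumerate_nil]
  | cons x xs ih =>
    have h1 : ((n : Int) + 1) = ((n + 1 : Nat) : Int) := by push_cast; ring
    rw [PySem.List.enumerate_cons, PySem.List.enumerate_cons]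
    simp only [List.map_cons, List.sum_cons, h1, ih (n + 1)]
    have h0 : ((0 : Int) + 1) = ((1 : Nat) : Int) := by norm_num
    rw [h0, ih 1]
    simp [Int.toNat_natCast, pow_succ]
    ring

-- the reversed-enumerate power sum is Horner's evaluation
theorem pv_horner_eq (ds : List Int) :
    ((PySem.List.enumerate ds.reverse 0).map (fun p => p.2 * 15 ^ p.1.toNat)).sum
      = ds.foldl (fun s d => s * 15 + d) 0 := by
  induction ds using List.reverseRecOn with
  | nil => simp [PySem.List.enumerate_nil]
  | append_singleton ds d ih =>
    rw [List.reverse_append, List.reverse_singleton, List.singleton_append,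
      PySem.List.enumerate_cons, List.foldl_append]
    simp only [List.map_cons, List.sum_cons, List.foldl_cons, List.foldl_nil]
    have h0 : ((0 : Int) + 1) = ((1 : Nat) : Int) := by norm_num
    rw [h0, pv_enum_shift ds.reverse 1, ih]
    simp
    ring

-- ===== VERDICT (by name: the statement is the Claim_ definition above) =====
theorem get_tiebreaker_scores_spec : Claim_equal_get_tiebreaker_scores := by
  intro cards_list base15_lut _ _
  unfold Spec_get_tiebreaker_scores get_tiebreaker_scores get_tiebreaker_scores_alt
  rw [PySem.List.foldl_append_singleton_eq_map]
  simp only [List.nil_append]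
  refine List.map_congr_left (fun card _ => ?_)
  rw [pv_horner_eq, List.foldl_map]
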